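-- pv_equiv track=rewrite | github.com/Casardo-Chen/surface-mllm-variations | backend/aggregation.py | get_model_differences
-- ===== SOURCE A (Python) =====
-- def get_model_differences(source):
--     """Count occurrences of each model in the source data."""
--     model_counts = {"gpt": 0, "claude": 0, "gemini": 0}
--
--     for model in source:
--         model_name = model[1]
--         if model_name in model_counts:
--             model_counts[model_name] += 1
--
--     result = []
--     for model, count in model_counts.items():
--         if count > 0:
--             result.append(f"{model.capitalize()}: {count}/3")
--
--     return f"({' '.join(result)})" if result else ""
-- ===== SOURCE B (Python) =====
-- def get_model_differences(source):
--     """Count occurrences of each model in the source data."""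
--     data = list(source)
--     counts = [("Gpt", sum(1 for m in data if m[1] == "gpt")),
--               ("Claude", sum(1 for m in data if m[1] == "claude")),
--               ("Gemini", sum(1 for m in data if m[1] == "gemini"))]
--     parts = [f"{label}: {c}/3" for label, c in counts if c > 0]
--     return f"({' '.join(parts)})" if parts else ""
-- ===== Notes on version B (the rewrite author's own statement) =====
-- stated objective: alternative
-- what changed: Replaces A's mutable dict tally (one pass filling a counter table, then a second pass over dict items formatting) with one dedicated count scan per model name and a comprehension building the labelled pieces directly, with the capitalized labels as literals.
import Mathlib
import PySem

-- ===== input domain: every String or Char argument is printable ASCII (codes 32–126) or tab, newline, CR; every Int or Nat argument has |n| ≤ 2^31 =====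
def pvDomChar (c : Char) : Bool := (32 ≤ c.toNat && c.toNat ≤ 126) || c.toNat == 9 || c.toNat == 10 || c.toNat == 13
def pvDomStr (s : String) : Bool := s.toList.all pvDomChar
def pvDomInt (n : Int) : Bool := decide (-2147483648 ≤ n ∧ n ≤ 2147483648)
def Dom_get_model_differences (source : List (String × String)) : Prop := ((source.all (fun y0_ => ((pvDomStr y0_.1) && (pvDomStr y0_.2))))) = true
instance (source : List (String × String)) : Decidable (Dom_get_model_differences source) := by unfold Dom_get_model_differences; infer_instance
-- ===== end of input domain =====

-- B replaces A's dict tally-then-format with one count scan per model name and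
-- a comprehension over literal labels: an alternative decomposition, same cost.

-- ===== PORT A =====
-- str.capitalize: first char uppercased, rest lowercased (exact on ASCII; no PySem primitive)
def pyCapitalize (s : String) : String :=
  match s.toList with
  | [] => s
  | ch :: rest => String.ofList (PySem.Chars.upper [ch] ++ PySem.Chars.lower rest)

def get_model_differences (source : List (String × String)) : String :=
  let model_counts : PySem.Dict String Int :=
    PySem.Dict.ofList [("gpt", 0), ("claude", 0), ("gemini", 0)]
  let model_counts := source.foldl (fun d model =>
      let model_name := model.2
      if d.contains model_name then d.modify model_name 0 (· + 1) else d) model_counts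
  let result := model_counts.items.foldl (fun acc mc =>
      if mc.2 > 0 then acc ++ [pyCapitalize mc.1 ++ ": " ++ PySem.Int.toStr mc.2 ++ "/3"] else acc) []
  if result ≠ [] then "(" ++ PySem.Str.join " " result ++ ")" else ""

-- ===== PORT B =====
def get_model_differences_alt (source : List (String × String)) : String :=
  let counts : List (String × Int) :=
    [("Gpt", (source.countP (fun m => m.2 == "gpt") : Int)),
     ("Claude", (source.countP (fun m => m.2 == "claude") : Int)),
     ("Gemini", (source.countP (fun m => m.2 == "gemini") : Int))]
  let parts := (counts.filter (fun lc => lc.2 > 0)).map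
      (fun lc => lc.1 ++ ": " ++ PySem.Int.toStr lc.2 ++ "/3")
  if parts ≠ [] then "(" ++ PySem.Str.join " " parts ++ ")" else ""

-- ===== PRECONDITION & SPEC =====
def Spec_get_model_differences (source : List (String × String)) (out : String) : Prop := out = get_model_differences_alt source
instance (source : List (String × String)) (out : String) : Decidable (Spec_get_model_differences source out) := by unfold Spec_get_model_differences; infer_instance

-- ===== CLAIM (what is proved, stated in full; the proofs are below) =====
def Claim_equal_get_model_differences : Prop := ∀ (source : List (String × String)), Dom_get_model_differences source → Spec_get_model_differences source (get_model_differences source)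

-- ===== LEMMAS AND PROOFS =====
-- A's loop body on the three-key counter dict: bump the matching slot, if any.
lemma step_eq (a b c : Int) (m : String × String) :
    (if (PySem.Dict.mk [("gpt", a), ("claude", b), ("gemini", c)]).contains m.2
     then (PySem.Dict.mk [("gpt", a), ("claude", b), ("gemini", c)]).modify m.2 0 (· + 1)
     else PySem.Dict.mk [("gpt", a), ("claude", b), ("gemini", c)])
    = PySem.Dict.mk [("gpt", a + if m.2 == "gpt" then 1 else 0),
                     ("claude", b + if m.2 == "claude" then 1 else 0),
                     ("gemini", c + if m.2 == "gemini" then 1 else 0)] := by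
  by_cases h1 : m.2 = "gpt"
  · simp [h1, PySem.Dict.contains, PySem.Dict.modify, PySem.Dict.get?, PySem.Dict.getD, PySem.Dict.insert]
  by_cases h2 : m.2 = "claude"
  · simp [h2, PySem.Dict.contains, PySem.Dict.modify, PySem.Dict.get?, PySem.Dict.getD, PySem.Dict.insert]
  by_cases h3 : m.2 = "gemini"
  · simp [h3, PySem.Dict.contains, PySem.Dict.modify, PySem.Dict.get?, PySem.Dict.getD, PySem.Dict.insert]
  · simp [PySem.Dict.contains, h1, h2, h3, Ne.symm h1, Ne.symm h2, Ne.symm h3]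

-- A's counting loop computes exactly B's three per-name counts.
lemma fold_eq (src : List (String × String)) (a b c : Int) :
    src.foldl (fun d model =>
      let model_name := model.2
      if d.contains model_name then d.modify model_name 0 (· + 1) else d)
      (PySem.Dict.mk [("gpt", a), ("claude", b), ("gemini", c)])
    = PySem.Dict.mk [("gpt", a + (src.countP (fun m => m.2 == "gpt") : Int)),
                     ("claude", b + (src.countP (fun m => m.2 == "claude") : Int)),
                     ("gemini", c + (src.countP (fun m => m.2 == "gemini") : Int))] := by
  induction src generalizing a b c with
  | nil => simp
  | cons m t ih =>
    simp only [List.foldl_cons]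
    rw [step_eq a b c m]
    rw [ih]
    simp only [List.countP_cons]
    split_ifs <;> simp_all <;> omega

-- ===== VERDICT (by name: the statement is the Claim_ definition above) =====
theorem get_model_differences_spec : Claim_equal_get_model_differences := by
  intro source _
  show get_model_differences source = get_model_differences_alt source
  simp only [get_model_differences, get_model_differences_alt]
  rw [show PySem.Dict.ofList [("gpt", (0:Int)), ("claude", 0), ("gemini", 0)]
      = PySem.Dict.mk [("gpt", 0), ("claude", 0), ("gemini", 0)] from by decide]
  rw [fold_eq]
  simp only [List.foldl_cons, List.foldl_nil, List.filter, zero_add]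
  norm_num
  split_ifs <;> simp_all <;> rfl
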